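-- pv_equiv track=rewrite | github.com/44rdvark/Networks | networks/common/c_close.py | c_close
-- ===== SOURCE A (Python) =====
-- from copy import deepcopy
--
-- def c_close(nodes, edges, c):
--     n_nodes = len(nodes)
--     new_edges = deepcopy(edges)
--     adj_matrix = [[0 for _ in range(n_nodes)] for _ in range(n_nodes)]
--     for edge in edges:
--         adj_matrix[edge[0]][edge[1]] += 1
--         adj_matrix[edge[1]][edge[0]] += 1
--     for node1 in nodes:
--         for node2 in nodes:
--             if node1 < node2 and adj_matrix[node1][node2] == 0 and common_neighbours(node1, node2, adj_matrix) >= c: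
--                 new_edges.append((node1, node2))
--     return new_edges
--
-- def common_neighbours(node1, node2, adj_matrix):
--     common = 0
--     for n in range(len(adj_matrix)):
--         if adj_matrix[node1][n] == adj_matrix[node2][n] == 1:
--             common += 1
--     return common
-- ===== SOURCE B (Python) =====
-- def c_close(nodes, edges, c):
--     n = len(nodes)
--     cnt = [[0] * n for _ in range(n)]
--     for a, b in edges:
--         cnt[a][b] += 1
--         cnt[b][a] += 1
--     # common-neighbour counts for ALL pairs in one pass: for each node m,
--     # every pair of rows that see m with multiplicity exactly 1 gains one common neighbour
--     com = [[0] * n for _ in range(n)]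
--     for m in range(n):
--         col = [r for r in range(n) if cnt[r][m] == 1]
--         for i in col:
--             com_i = com[i]
--             for j in col:
--                 com_i[j] += 1
--     new_edges = list(edges)
--     for n1 in nodes:
--         for n2 in nodes:
--             if n1 < n2 and cnt[n1][n2] == 0 and com[n1][n2] >= c:
--                 new_edges.append((n1, n2))
--     return new_edges
-- ===== Notes on version B (the rewrite author's own statement) =====
-- stated objective: faster
-- what changed: Instead of re-scanning all n candidate neighbours for every non-adjacent pair (A's common_neighbours call inside the n*n pair loop), B precomputes every pair's common-neighbour count in one triangle-enumeration pass (for each node m, increment the counter of every pair of rows adjacent to m with multiplicity exactly 1), so the final pair scan does O(1) work per pair.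
import Mathlib
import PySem

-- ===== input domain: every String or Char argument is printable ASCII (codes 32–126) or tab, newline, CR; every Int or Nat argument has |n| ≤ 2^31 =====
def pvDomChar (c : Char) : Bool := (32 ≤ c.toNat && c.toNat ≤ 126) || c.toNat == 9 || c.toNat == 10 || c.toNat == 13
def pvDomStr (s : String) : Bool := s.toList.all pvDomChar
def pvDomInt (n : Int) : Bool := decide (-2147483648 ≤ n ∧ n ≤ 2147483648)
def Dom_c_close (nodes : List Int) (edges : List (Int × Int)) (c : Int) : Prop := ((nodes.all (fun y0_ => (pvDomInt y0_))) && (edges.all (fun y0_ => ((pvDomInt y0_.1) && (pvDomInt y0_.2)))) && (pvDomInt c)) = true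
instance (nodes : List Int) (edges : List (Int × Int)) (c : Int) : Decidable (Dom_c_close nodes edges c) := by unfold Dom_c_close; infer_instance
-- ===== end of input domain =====

-- B replaces A's per-pair O(n) common_neighbours rescan by one triangle-enumeration pass that
-- precomputes all pairwise common-neighbour counts (objective: faster).
-- A mutates nothing the caller observes (it deepcopies edges); the claim is about the return value.

-- ===== PORT A =====
-- m[i][j] read; the pyGetD defaults are taken only where Python raises IndexError (outside Pre_)
def pvGet2 (m : List (List Int)) (i j : Int) : Int :=
  PySem.List.pyGetD (PySem.List.pyGetD m i []) j 0

-- m[i][j] += 1 (as a value: replace row i by the updated row)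
def pvInc2 (m : List (List Int)) (i j : Int) : List (List Int) :=
  PySem.List.pySetD m i
    (PySem.List.pySetD (PySem.List.pyGetD m i []) j (pvGet2 m i j + 1))

-- the adjacency(-multiplicity) matrix built by A's first loop
def pvBuildAdj (n : Nat) (edges : List (Int × Int)) : List (List Int) :=
  edges.foldl (fun m e => pvInc2 (pvInc2 m e.1 e.2) e.2 e.1)
    (List.replicate n (List.replicate n 0))

-- A's helper: chained comparison adj[node1][n] == adj[node2][n] == 1 ported literally
def common_neighbours (node1 node2 : Int) (adj : List (List Int)) : Int :=
  (PySem.List.pyRange 0 (adj.length : Int) 1).foldl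
    (fun common nn =>
      if pvGet2 adj node1 nn = pvGet2 adj node2 nn ∧ pvGet2 adj node2 nn = 1
      then common + 1 else common) 0

def c_close (nodes : List Int) (edges : List (Int × Int)) (c : Int) : List (Int × Int) :=
  let adj := pvBuildAdj nodes.length edges
  nodes.foldl (fun acc n1 =>
    nodes.foldl (fun acc n2 =>
      if n1 < n2 ∧ pvGet2 adj n1 n2 = 0 ∧ common_neighbours n1 n2 adj ≥ c
      then acc ++ [(n1, n2)] else acc) acc) edges

-- ===== PORT B =====
-- B's first loop: identical multiplicity matrix (same loop as A's first loop)
def pvBuildCnt (n : Nat) (edges : List (Int × Int)) : List (List Int) :=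
  edges.foldl (fun m e => pvInc2 (pvInc2 m e.1 e.2) e.2 e.1)
    (List.replicate n (List.replicate n 0))

-- B's triangle-enumeration pass, one column m at a time: every pair (i,j) of rows
-- seeing column m with multiplicity exactly 1 gains one common neighbour
def pvComStep (n : Nat) (cnt : List (List Int)) (com : List (List Int)) (m : Nat) : List (List Int) :=
  let col : List Nat :=
    (List.range n).filter (fun r : Nat => decide (pvGet2 cnt (r : Int) (m : Int) = 1))
  col.foldl (fun com2 (i : Nat) =>
    col.foldl (fun com3 (j : Nat) => pvInc2 com3 (i : Int) (j : Int)) com2) com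

def pvBuildCom (n : Nat) (cnt : List (List Int)) : List (List Int) :=
  (List.range n).foldl (pvComStep n cnt) (List.replicate n (List.replicate n 0))

def c_close_alt (nodes : List Int) (edges : List (Int × Int)) (c : Int) : List (Int × Int) :=
  let cnt := pvBuildCnt nodes.length edges
  let com := pvBuildCom nodes.length cnt
  nodes.foldl (fun acc n1 =>
    nodes.foldl (fun acc n2 =>
      if n1 < n2 ∧ pvGet2 cnt n1 n2 = 0 ∧ pvGet2 com n1 n2 ≥ c
      then acc ++ [(n1, n2)] else acc) acc) edges

-- ===== PRECONDITION & SPEC =====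
-- Pre_ excludes exactly the inputs on which the Python A raises IndexError: an edge endpoint
-- outside [-len(nodes), len(nodes)), or a pair n1 < n2 of listed nodes with an endpoint outside
-- that range (the adjacency lookups are only evaluated for pairs with n1 < n2).
def Pre_c_close (nodes : List Int) (edges : List (Int × Int)) (c : Int) : Prop :=
  (∀ e ∈ edges, (-(nodes.length : Int) ≤ e.1 ∧ e.1 < (nodes.length : Int)) ∧
                (-(nodes.length : Int) ≤ e.2 ∧ e.2 < (nodes.length : Int))) ∧
  (∀ n1 ∈ nodes, ∀ n2 ∈ nodes, n1 < n2 →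
      (-(nodes.length : Int) ≤ n1 ∧ n1 < (nodes.length : Int)) ∧
      (-(nodes.length : Int) ≤ n2 ∧ n2 < (nodes.length : Int)))
instance (nodes : List Int) (edges : List (Int × Int)) (c : Int) : Decidable (Pre_c_close nodes edges c) := by unfold Pre_c_close; infer_instance

def pvWitness_c_close : List Int × (List (Int × Int)) × Int := ([0, 1, 2], [(0, 1), (1, 2)], 1)

def Spec_c_close (nodes : List Int) (edges : List (Int × Int)) (c : Int) (out : List (Int × Int)) : Prop := out = c_close_alt nodes edges c
instance (nodes : List Int) (edges : List (Int × Int)) (c : Int) (out : List (Int × Int)) : Decidable (Spec_c_close nodes edges c out) := by unfold Spec_c_close; infer_instance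

-- ===== CLAIM (what is proved, stated in full; the proofs are below) =====
def Claim_equal_c_close : Prop := ∀ (nodes : List Int) (edges : List (Int × Int)) (c : Int), Dom_c_close nodes edges c → Pre_c_close nodes edges c → Spec_c_close nodes edges c (c_close nodes edges c)

-- ===== LEMMAS AND PROOFS =====

-- nat-index forms of the matrix primitives
def pvValN (m : List (List Int)) (a b : Nat) : Int := (m.getD a []).getD b 0
def pvIncN (m : List (List Int)) (a b : Nat) : List (List Int) :=
  m.set a ((m.getD a []).set b (pvValN m a b + 1))

def pvShape (n : Nat) (m : List (List Int)) : Prop :=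
  m.length = n ∧ ∀ row ∈ m, row.length = n

theorem pvIdx_some_lt {n : Nat} {i : Int} {a : Nat}
    (h : PySem.List.pyIdx? n i = some a) : a < n := by
  unfold PySem.List.pyIdx? at h
  split_ifs at h <;> simp_all <;> omega

theorem pvGetD_idx_some {α : Type} {xs : List α} {i : Int} {a : Nat} (d : α)
    (h : PySem.List.pyIdx? xs.length i = some a) :
    PySem.List.pyGetD xs i d = xs.getD a d := by
  simp [PySem.List.pyGetD, PySem.List.pyGet?, h, List.getD_eq_getElem?_getD]

theorem pvGetD_idx_none {α : Type} {xs : List α} {i : Int} (d : α)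
    (h : PySem.List.pyIdx? xs.length i = none) :
    PySem.List.pyGetD xs i d = d := by
  simp [PySem.List.pyGetD, PySem.List.pyGet?, h]

theorem pvSetD_idx_some {α : Type} {xs : List α} {i : Int} {a : Nat} (v : α)
    (h : PySem.List.pyIdx? xs.length i = some a) :
    PySem.List.pySetD xs i v = xs.set a v := by
  simp [PySem.List.pySetD, PySem.List.pySet?, h]

theorem pvSetD_idx_none {α : Type} {xs : List α} {i : Int} (v : α)
    (h : PySem.List.pyIdx? xs.length i = none) :
    PySem.List.pySetD xs i v = xs := by
  simp [PySem.List.pySetD, PySem.List.pySet?, h]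

theorem pvGet2_natCast (m : List (List Int)) (a b : Nat) :
    pvGet2 m (a : Int) (b : Int) = pvValN m a b := by
  simp [pvGet2, pvValN, List.getD_eq_getElem?_getD]

theorem pvInc2_natCast (m : List (List Int)) (a b : Nat) :
    pvInc2 m (a : Int) (b : Int) = pvIncN m a b := by
  simp [pvInc2, pvGet2, pvIncN, pvValN, List.getD_eq_getElem?_getD]

-- shape facts
theorem pvShape_inc2 {n : Nat} {m : List (List Int)} (h : pvShape n m) (i j : Int) :
    pvShape n (pvInc2 m i j) := by
  obtain ⟨hl, hr⟩ := h
  constructor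
  · simp [pvInc2, PySem.List.length_pySetD, hl]
  · intro row hrow
    unfold pvInc2 at hrow
    cases hidx : PySem.List.pyIdx? m.length i with
    | none => rw [pvSetD_idx_none _ hidx] at hrow; exact hr row hrow
    | some a =>
      rw [pvSetD_idx_some _ hidx] at hrow
      rcases List.mem_or_eq_of_mem_set hrow with h1 | h1
      · exact hr row h1
      · subst h1
        rw [PySem.List.length_pySetD, pvGetD_idx_some [] hidx]
        have ha : a < m.length := pvIdx_some_lt hidx
        have : m.getD a [] = m[a] := by simp [List.getD_eq_getElem?_getD, List.getElem?_eq_getElem ha]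
        rw [this]
        exact hr _ (List.getElem_mem ha)

theorem pvShape_incN {n : Nat} {m : List (List Int)} (h : pvShape n m) (a b : Nat) :
    pvShape n (pvIncN m a b) := by
  have := pvShape_inc2 h (a : Int) (b : Int)
  rwa [pvInc2_natCast] at this

theorem pvShape_buildAdj (n : Nat) (edges : List (Int × Int)) :
    pvShape n (pvBuildAdj n edges) := by
  unfold pvBuildAdj
  induction edges using List.reverseRecOn with
  | nil => exact ⟨by simp, by intro row h; simp_all [List.eq_of_mem_replicate h]⟩
  | append_singleton es e ih =>
    rw [List.foldl_append, List.foldl_cons, List.foldl_nil]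
    exact pvShape_inc2 (pvShape_inc2 ih _ _) _ _

-- value of one nat-index increment
theorem pvValN_incN {n : Nat} {m : List (List Int)} (h : pvShape n m)
    {a b : Nat} (ha : a < n) (hb : b < n) (x y : Nat) :
    pvValN (pvIncN m a b) x y = pvValN m x y + (if x = a ∧ y = b then 1 else 0) := by
  obtain ⟨hl, hr⟩ := h
  have ham : a < m.length := hl ▸ ha
  have hrow : m.getD a [] = m[a] := by simp [List.getD_eq_getElem?_getD, List.getElem?_eq_getElem ham]
  have hrl : (m[a] : List Int).length = n := hr _ (List.getElem_mem ham)
  unfold pvIncN pvValN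
  by_cases hxa : x = a
  · subst hxa
    rw [hrow]
    simp only [List.getD_eq_getElem?_getD, List.getElem?_set, if_pos ham]
    by_cases hyb : y = b
    · subst hyb
      simp [hrl ▸ hb]
    · simp [Ne.symm hyb, hyb]
  · simp [List.getD_eq_getElem?_getD, Ne.symm hxa, hxa]

-- value is 0 everywhere on the initial zero matrix
theorem pvValN_zero (n : Nat) (x y : Nat) :
    pvValN (List.replicate n (List.replicate n 0)) x y = 0 := by
  unfold pvValN
  by_cases hx : x < n
  · by_cases hy : y < n <;>
      simp [List.getD_eq_getElem?_getD, hx, hy]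
  · simp [List.getD_eq_getElem?_getD, hx]

-- inner loop of the triangle pass: a whole row of +1s
theorem pvInner_val {n : Nat} (col : List Nat) (hcol : ∀ j ∈ col, j < n)
    (hnd : col.Nodup) {com : List (List Int)} (hsh : pvShape n com)
    {i : Nat} (hi : i < n) (x y : Nat) :
    pvValN (col.foldl (fun c j => pvIncN c i j) com) x y
      = pvValN com x y + (if x = i ∧ y ∈ col then 1 else 0) := by
  induction col generalizing com with
  | nil => simp
  | cons j col ih =>
    have hj : j < n := hcol j (List.mem_cons_self ..)
    rw [List.foldl_cons,
        ih (fun k hk => hcol k (List.mem_cons_of_mem _ hk)) (List.nodup_cons.mp hnd).2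
          (pvShape_incN hsh i j),
        pvValN_incN hsh hi hj]
    by_cases hx : x = i
    · subst hx
      by_cases hy : y = j
      · subst hy
        have : y ∉ col := (List.nodup_cons.mp hnd).1
        simp [this]
      · by_cases hyc : y ∈ col <;> simp [hy, hyc]
    · simp [hx]

theorem pvShape_innerFold {n : Nat} (col : List Nat) {com : List (List Int)}
    (hsh : pvShape n com) (i : Nat) :
    pvShape n (col.foldl (fun c j => pvIncN c i j) com) := by
  induction col generalizing com with
  | nil => exact hsh
  | cons j col ih => exact ih (pvShape_incN hsh i j)

-- middle loop: the double fold over col × col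
theorem pvDouble_val {n : Nat} (col : List Nat) (hcol : ∀ j ∈ col, j < n) (hnd : col.Nodup)
    (out : List Nat) (hout : ∀ j ∈ out, j < n) (hond : out.Nodup)
    {com : List (List Int)} (hsh : pvShape n com) (x y : Nat) :
    pvValN (out.foldl (fun c i => col.foldl (fun c2 j => pvIncN c2 i j) c) com) x y
      = pvValN com x y + (if x ∈ out ∧ y ∈ col then 1 else 0) := by
  induction out generalizing com with
  | nil => simp
  | cons i out ih =>
    have hi : i < n := hout i (List.mem_cons_self ..)
    rw [List.foldl_cons,
        ih (fun k hk => hout k (List.mem_cons_of_mem _ hk)) (List.nodup_cons.mp hond).2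
          (pvShape_innerFold col hsh i),
        pvInner_val col hcol hnd hsh hi]
    by_cases hx : x = i
    · subst hx
      have : x ∉ out := (List.nodup_cons.mp hond).1
      by_cases hy : y ∈ col <;> simp [this, hy]
    · by_cases hxo : x ∈ out <;> simp [hx, hxo]

theorem pvShape_doubleFold {n : Nat} (col out : List Nat) {com : List (List Int)}
    (hsh : pvShape n com) :
    pvShape n (out.foldl (fun c i => col.foldl (fun c2 j => pvIncN c2 i j) c) com) := by
  induction out generalizing com with
  | nil => exact hsh
  | cons i out ih => exact ih (pvShape_innerFold col hsh i)

-- characterisation of the whole triangle pass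
theorem pvComStep_shape {n : Nat} (cnt : List (List Int)) {com : List (List Int)}
    (hsh : pvShape n com) (m : Nat) : pvShape n (pvComStep n cnt com m) := by
  unfold pvComStep
  simp only [pvInc2_natCast]
  exact pvShape_doubleFold _ _ hsh

theorem pvComStep_val (n : Nat) (cnt : List (List Int)) {com : List (List Int)}
    (hsh : pvShape n com) {x y : Nat} (hx : x < n) (hy : y < n) (m : Nat) :
    pvValN (pvComStep n cnt com m) x y
      = pvValN com x y + (if pvValN cnt x m = 1 ∧ pvValN cnt y m = 1 then 1 else 0) := by
  unfold pvComStep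
  simp only [pvInc2_natCast]
  have hcolmem : ∀ j ∈ (List.range n).filter
      (fun r : Nat => decide (pvGet2 cnt (r : Int) (m : Int) = 1)), j < n := by
    intro j hj
    exact List.mem_range.mp (List.mem_of_mem_filter hj)
  have hcolnd : ((List.range n).filter
      (fun r : Nat => decide (pvGet2 cnt (r : Int) (m : Int) = 1))).Nodup :=
    List.Nodup.filter _ List.nodup_range
  rw [pvDouble_val _ hcolmem hcolnd _ hcolmem hcolnd hsh]
  congr 1
  have hmem : ∀ z : Nat, z < n →
      (z ∈ (List.range n).filter (fun r : Nat => decide (pvGet2 cnt (r : Int) (m : Int) = 1))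
        ↔ pvValN cnt z m = 1) := by
    intro z hz
    simp [List.mem_filter, List.mem_range, hz, pvGet2_natCast]
  by_cases hc : pvValN cnt x m = 1 ∧ pvValN cnt y m = 1
  · rw [if_pos ⟨(hmem x hx).mpr hc.1, (hmem y hy).mpr hc.2⟩, if_pos hc]
  · rw [if_neg (fun h => hc ⟨(hmem x hx).mp h.1, (hmem y hy).mp h.2⟩), if_neg hc]

theorem pvShape_buildCom (n : Nat) (cnt : List (List Int)) :
    pvShape n (pvBuildCom n cnt) := by
  unfold pvBuildCom
  have : ∀ (ms : List Nat) (com : List (List Int)), pvShape n com →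
      pvShape n (ms.foldl (pvComStep n cnt) com) := by
    intro ms
    induction ms with
    | nil => exact fun _ h => h
    | cons m ms ih => exact fun com hsh => ih _ (pvComStep_shape cnt hsh m)
  exact this _ _ ⟨by simp, by intro row h; simp_all [List.eq_of_mem_replicate h]⟩

theorem pvCom_val (n : Nat) (cnt : List (List Int)) {x y : Nat} (hx : x < n) (hy : y < n) :
    pvValN (pvBuildCom n cnt) x y
      = ((List.range n).countP
          (fun m => decide (pvValN cnt x m = 1 ∧ pvValN cnt y m = 1)) : Int) := by
  unfold pvBuildCom
  have main : ∀ (ms : List Nat) (com : List (List Int)), pvShape n com →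
      pvValN (ms.foldl (pvComStep n cnt) com) x y
        = pvValN com x y
          + (ms.countP (fun m => decide (pvValN cnt x m = 1 ∧ pvValN cnt y m = 1)) : Int) := by
    intro ms
    induction ms with
    | nil => simp
    | cons m ms ih =>
      intro com hsh
      rw [List.foldl_cons, ih _ (pvComStep_shape cnt hsh m),
          pvComStep_val n cnt hsh hx hy, List.countP_cons]
      by_cases hc : pvValN cnt x m = 1 ∧ pvValN cnt y m = 1
      · simp [hc]
        ring
      · simp [hc]
  rw [main (List.range n) _ ⟨by simp, by intro row h; simp_all [List.eq_of_mem_replicate h]⟩,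
      pvValN_zero, zero_add]

-- counting form of A's common_neighbours loop
theorem pvCommon_count (i j : Int) (M : List (List Int)) :
    common_neighbours i j M
      = ((List.range M.length).countP
          (fun (k : Nat) => decide (pvGet2 M i (k : Int) = pvGet2 M j (k : Int)
                     ∧ pvGet2 M j (k : Int) = 1)) : Int) := by
  unfold common_neighbours
  rw [PySem.List.pyRange_zero_natCast, List.foldl_map]
  have := PySem.List.foldl_count_if
    (fun (k : Nat) => decide (pvGet2 M i (k : Int) = pvGet2 M j (k : Int)
                     ∧ pvGet2 M j (k : Int) = 1)) (List.range M.length) 0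
  simpa using this

-- the crux: A's per-pair rescan equals B's precomputed entry, for every Int pair
theorem pvCrux {n : Nat} {M : List (List Int)} (hsh : pvShape n M) (i j : Int) :
    common_neighbours i j M = pvGet2 (pvBuildCom n M) i j := by
  have hlen : M.length = n := hsh.1
  have hcomsh := pvShape_buildCom n M
  rw [pvCommon_count, hlen]
  cases hi : PySem.List.pyIdx? n i with
  | none =>
    -- row i out of range: A counts nothing, B's lookup defaults to 0
    have hA : ∀ k : Nat, pvGet2 M i (k : Int) = 0 := by
      intro k
      unfold pvGet2
      rw [pvGetD_idx_none [] (by rw [hlen]; exact hi)]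
      simp [PySem.List.pyGetD, PySem.List.pyGet?, PySem.List.pyIdx?]
    have hB : pvGet2 (pvBuildCom n M) i j = 0 := by
      unfold pvGet2
      rw [pvGetD_idx_none [] (by rw [hcomsh.1]; exact hi)]
      simp [PySem.List.pyGetD, PySem.List.pyGet?, PySem.List.pyIdx?]
    have hz : (List.range n).countP
        (fun (k : Nat) => decide (pvGet2 M i (k : Int) = pvGet2 M j (k : Int)
                     ∧ pvGet2 M j (k : Int) = 1)) = 0 := by
      apply List.countP_eq_zero.mpr
      intro k _
      simp only [hA k, decide_eq_true_eq]
      intro h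
      omega
    rw [hB, hz]
    simp
  | some a =>
    have ha : a < n := pvIdx_some_lt hi
    have hrowlen : ((pvBuildCom n M).getD a []).length = n := by
      have ham : a < (pvBuildCom n M).length := by rw [hcomsh.1]; exact ha
      have heq : (pvBuildCom n M).getD a [] = (pvBuildCom n M)[a] := by
        simp [List.getD_eq_getElem?_getD, List.getElem?_eq_getElem ham]
      rw [heq]
      exact hcomsh.2 _ (List.getElem_mem ham)
    cases hj : PySem.List.pyIdx? n j with
    | none =>
      have hA : ∀ k : Nat, pvGet2 M j (k : Int) = 0 := by
        intro k
        unfold pvGet2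
        rw [pvGetD_idx_none [] (by rw [hlen]; exact hj)]
        simp [PySem.List.pyGetD, PySem.List.pyGet?, PySem.List.pyIdx?]
      have hB : pvGet2 (pvBuildCom n M) i j = 0 := by
        unfold pvGet2
        rw [pvGetD_idx_some [] (by rw [hcomsh.1]; exact hi),
            pvGetD_idx_none 0 (by rw [hrowlen]; exact hj)]
      have hz : (List.range n).countP
          (fun (k : Nat) => decide (pvGet2 M i (k : Int) = pvGet2 M j (k : Int)
                       ∧ pvGet2 M j (k : Int) = 1)) = 0 := by
        apply List.countP_eq_zero.mpr
        intro k _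
        simp only [hA k, decide_eq_true_eq]
        omega
      rw [hB, hz]
      simp
    | some b =>
      have hb : b < n := pvIdx_some_lt hj
      have hAi : ∀ k : Nat, pvGet2 M i (k : Int) = pvValN M a k := by
        intro k
        unfold pvGet2 pvValN
        rw [pvGetD_idx_some [] (by rw [hlen]; exact hi)]
        simp [List.getD_eq_getElem?_getD]
      have hAj : ∀ k : Nat, pvGet2 M j (k : Int) = pvValN M b k := by
        intro k
        unfold pvGet2 pvValN
        rw [pvGetD_idx_some [] (by rw [hlen]; exact hj)]
        simp [List.getD_eq_getElem?_getD]
      have hB : pvGet2 (pvBuildCom n M) i j = pvValN (pvBuildCom n M) a b := by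
        unfold pvGet2 pvValN
        rw [pvGetD_idx_some [] (by rw [hcomsh.1]; exact hi),
            pvGetD_idx_some 0 (by rw [hrowlen]; exact hj)]
      rw [hB, pvCom_val n M ha hb]
      congr 1
      apply List.countP_congr
      intro k _
      simp only [hAi k, hAj k, decide_eq_true_eq]
      constructor <;> intro h <;> omega

-- total equality of the two ports
theorem pvMain (nodes : List Int) (edges : List (Int × Int)) (c : Int) :
    c_close nodes edges c = c_close_alt nodes edges c := by
  unfold c_close c_close_alt
  have hcnt : pvBuildCnt = pvBuildAdj := rfl
  rw [hcnt]
  have hsh := pvShape_buildAdj nodes.length edges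
  have hc : ∀ i j : Int,
      common_neighbours i j (pvBuildAdj nodes.length edges)
        = pvGet2 (pvBuildCom nodes.length (pvBuildAdj nodes.length edges)) i j :=
    fun i j => pvCrux hsh i j
  simp only [hc]

-- ===== VERDICT (by name: the statement is the Claim_ definition above) =====
theorem c_close_spec : Claim_equal_c_close := by
  intro nodes edges c _ _
  unfold Spec_c_close
  exact pvMain nodes edges c
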